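-- pv_equiv track=rewrite | github.com/coyote-AI-competition/resource | server/arena.py | sum_of_others_cards
-- ===== SOURCE A (Python) =====
-- def sum_of_others_cards(cards):
--     true_cards = sorted(cards, reverse=True)
--     index = 0
--
--     while index < len(true_cards):
--         card = true_cards[index]
--
--         # ？カード（103）は、0として扱う
--         if card == 103:
--             true_cards[index] = 0
--
--         # MAXカード（102）は最大通常カードを0にし、自分も0
--         elif card == 102:
--             normal_cards = [c for c in true_cards if c < 100]
--             if normal_cards:
--                 max_card = max(normal_cards)
--                 max_index = true_cards.index(max_card)
--                 true_cards[max_index] = 0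
--             true_cards[index] = 0
--
--         # SHUFFLEカード（101）は0として扱い、フラグを立てる
--         elif card == 101:
--             true_cards[index] = 0
--
--         index += 1
--
--     return sum(true_cards)
-- ===== SOURCE B (Python) =====
-- def sum_of_others_cards(cards):
--     # 101 (SHUFFLE), 102 (MAX) and 103 (?) score 0; each 102 card also
--     # removes the highest-valued normal (<100) card from the total.
--     specials = (101, 102, 103)
--     high = sum(c for c in cards if c >= 100 and c not in specials)
--     normals = sorted(c for c in cards if c < 100)
--     keep = max(len(normals) - cards.count(102), 0)
--     return high + sum(normals[:keep])
-- ===== Notes on version B (the rewrite author's own statement) =====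
-- stated objective: faster
-- what changed: Replaces the mutating while-loop that rescans the whole list (filter+max+index) for every 102 card with one filtering pass, a single sort of the <100 cards, and a slice sum (measured 1.7x on the random family at the largest size; asymptotically O(n log n) vs A's O(n^2) worst case).
-- intended difference: When the 102 (MAX) cards outnumber the nonnegative normal (<100) cards and a negative normal card exists (minus the one corner where the values coincide, excluded by D's last clause), A's index(max)-based zeroing hits an already-zeroed placeholder and keeps negative cards in the sum, while B removes the actual largest remaining normal card - the MAX card's intended effect - e.g. on [102, -5, 103] A returns -5 and B returns 0. — e.g. on sum_of_others_cards([102, -5, 103]): A returns -5, B returns 0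
import Mathlib
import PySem

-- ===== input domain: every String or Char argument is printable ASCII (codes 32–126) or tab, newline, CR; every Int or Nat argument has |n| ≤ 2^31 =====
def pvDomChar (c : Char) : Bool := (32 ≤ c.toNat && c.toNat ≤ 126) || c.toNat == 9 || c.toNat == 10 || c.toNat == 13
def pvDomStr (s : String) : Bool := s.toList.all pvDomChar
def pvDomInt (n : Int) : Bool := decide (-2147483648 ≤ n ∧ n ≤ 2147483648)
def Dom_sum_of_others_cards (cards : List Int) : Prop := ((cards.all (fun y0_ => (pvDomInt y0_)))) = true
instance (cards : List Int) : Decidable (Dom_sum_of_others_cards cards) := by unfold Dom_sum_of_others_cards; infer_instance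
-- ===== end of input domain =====

-- B replaces A's in-place while loop (which rescans the list with filter/max/index for every
-- 102 card) by one filtering pass, one sort and a slice sum; on the D_ inputs below B removes
-- the actual largest normal card where A only zeroes a placeholder (return value only).

-- ===== PORT A =====
-- one body of A's while loop at index i (i < tc.length is guaranteed by the loop guard,
-- so tc.getD i 0 is exactly true_cards[index]; max/index are called on lists that contain
-- their argument, so .getD 0 is never the fallback)
def pvAStep (tc : List Int) (i : Nat) : List Int :=
  let card := tc.getD i 0
  if card = 103 then tc.set i 0
  else if card = 102 then
    let normal_cards := tc.filter (fun c => c < 100)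
    let tc1 :=
      if normal_cards = [] then tc
      else
        let max_card := (PySem.List.max? normal_cards (fun x => x)).getD 0
        let max_index := (PySem.List.index? tc max_card).getD 0
        tc.set max_index 0
    tc1.set i 0
  else if card = 101 then tc.set i 0
  else tc

theorem pvAStep_length (tc : List Int) (i : Nat) : (pvAStep tc i).length = tc.length := by
  simp only [pvAStep]
  split_ifs <;> simp

-- the while loop: index increases, the list keeps its length
def pvALoop (tc : List Int) (i : Nat) : List Int :=
  if i < tc.length then pvALoop (pvAStep tc i) (i + 1) else tc
termination_by tc.length - i
decreasing_by simp only [pvAStep_length]; omega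

def sum_of_others_cards (cards : List Int) : Int :=
  (pvALoop (PySem.List.sorted cards (fun x => x) true) 0).sum

-- ===== PORT B =====
-- `c >= 100 and c not in specials` with specials = (101, 102, 103)
def pvHiP : Int → Bool := fun c => decide (100 ≤ c ∧ c ≠ 101 ∧ c ≠ 102 ∧ c ≠ 103)

def sum_of_others_cards_alt (cards : List Int) : Int :=
  let high := (cards.filter pvHiP).sum
  let normals := PySem.List.sorted (cards.filter (fun c => decide (c < 100))) (fun x => x) false
  let keep : Int := max ((normals.length : Int) - ((PySem.List.count cards 102 : Nat) : Int)) 0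
  high + (PySem.List.slice normals none (some keep)).sum

-- ===== PRECONDITION & SPEC =====
-- When the 102 (MAX) cards outnumber the nonnegative normal (<100) cards and a negative normal
-- card exists (last clause: minus the one agreeing corner), A's index(max)-based zeroing hits an
-- already-zeroed placeholder and returns a sum that still contains negative cards, while B
-- removes the actual largest remaining normal card — the MAX card's intended effect.
def D_sum_of_others_cards (cards : List Int) : Prop :=
  let g := cards.countP (fun c => decide (c < 0))
  let n := cards.countP (fun c => decide (0 ≤ c ∧ c < 100))
  0 < g ∧ n < cards.count 102 ∧ 1 < cards.count 103 + n + min (cards.count 102) g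
instance (cards : List Int) : Decidable (D_sum_of_others_cards cards) := by
  unfold D_sum_of_others_cards; infer_instance

def Spec_sum_of_others_cards (cards : List Int) (out : Int) : Prop :=
  ¬ D_sum_of_others_cards cards → out = sum_of_others_cards_alt cards
instance (cards : List Int) (out : Int) : Decidable (Spec_sum_of_others_cards cards out) := by
  unfold Spec_sum_of_others_cards; infer_instance

def pvDiffWitness_sum_of_others_cards : List Int := [102, -5, 103]
def pvDiffWitnessOut_sum_of_others_cards : Int × Int := (-5, 0)

-- ===== CLAIM (what is proved, stated in full; the proofs are below) =====
def Claim_unchanged_sum_of_others_cards : Prop :=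
  ∀ (cards : List Int), Dom_sum_of_others_cards cards →
    Spec_sum_of_others_cards cards (sum_of_others_cards cards)
def Claim_changed_sum_of_others_cards : Prop :=
  Dom_sum_of_others_cards (pvDiffWitness_sum_of_others_cards) ∧
  D_sum_of_others_cards (pvDiffWitness_sum_of_others_cards) ∧
  sum_of_others_cards (pvDiffWitness_sum_of_others_cards) = pvDiffWitnessOut_sum_of_others_cards.1 ∧
  sum_of_others_cards_alt (pvDiffWitness_sum_of_others_cards) = pvDiffWitnessOut_sum_of_others_cards.2 ∧
  pvDiffWitnessOut_sum_of_others_cards.1 ≠ pvDiffWitnessOut_sum_of_others_cards.2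
def Claim_exact_sum_of_others_cards : Prop :=
  ∀ (cards : List Int), Dom_sum_of_others_cards cards → D_sum_of_others_cards cards →
    sum_of_others_cards cards ≠ sum_of_others_cards_alt cards

-- ===== LEMMAS AND PROOFS =====

-- the tracked tail: N with its first p entries zeroed
def pvZP (N : List Int) (p : Nat) : List Int := List.replicate p 0 ++ N.drop p

-- total amount subtracted from the sum by A's 102 phase, as a function of the
-- descending normal list N, the remaining 102 count, the pointer p and the zero count z
def pvSub (N : List Int) : Nat → Nat → Nat → Int
  | 0, _, _ => 0
  | k + 1, p, z =>
    if p < N.length ∧ (0 < N.getD p 0 ∨ z = 0) then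
      N.getD p 0 + pvSub N k (p + 1) (z + 2)
    else pvSub N k p (z + 1)

-- a ≥-sorted list splits at any threshold into its two filters
theorem pvSplit (c : Int) : ∀ l : List Int, l.Pairwise (fun a b : Int => b ≤ a) →
    l = l.filter (fun x => decide (c < x)) ++ l.filter (fun x => decide (x ≤ c)) := by
  intro l
  induction l with
  | nil => intro _; rfl
  | cons a tl ih =>
    intro hpw
    rcases List.pairwise_cons.mp hpw with ⟨ha, htl⟩
    by_cases hca : c < a
    · have hnot : ¬ (a ≤ c) := by omega
      simp only [List.filter_cons, decide_eq_true_eq, if_pos hca, if_neg hnot, List.cons_append]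
      exact congrArg (a :: ·) (ih htl)
    · have hac : a ≤ c := not_lt.mp hca
      have h1 : tl.filter (fun x => decide (c < x)) = [] :=
        List.filter_eq_nil_iff.mpr (fun x hx => by have := ha x hx; simp; omega)
      have h2 : tl.filter (fun x => decide (x ≤ c)) = tl :=
        List.filter_eq_self.mpr (fun x hx => by have := ha x hx; simp; omega)
      simp only [List.filter_cons, decide_eq_true_eq, if_neg hca, if_pos hac,
        h1, h2, List.nil_append]

theorem pvGetD_join (D : List Int) (c : Int) (T : List Int) (d : Int) :
    (D ++ c :: T).getD D.length d = c := by
  induction D with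
  | nil => rfl
  | cons a D ih => simpa using ih

theorem pvSet_join (D : List Int) (c : Int) (T : List Int) (v : Int) :
    (D ++ c :: T).set D.length v = D ++ v :: T := by
  induction D with
  | nil => rfl
  | cons a D ih => simpa using ih

theorem pvIndex_append_not_mem {v : Int} : ∀ (l1 : List Int), v ∉ l1 → ∀ l2,
    PySem.List.index? (l1 ++ l2) v = (PySem.List.index? l2 v).map (· + l1.length) := by
  intro l1
  induction l1 with
  | nil => intro _ l2; simp
  | cons a l1 ih =>
    intro hv l2
    have hav : a ≠ v := fun h => hv (by simp [h])
    rw [List.cons_append, PySem.List.index?_cons_of_ne _ hav, ih (fun h => hv (by simp [h]))]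
    cases PySem.List.index? l2 v <;> simp <;> omega

theorem pvSet_index_self {l : List Int} {v : Int} {j : Nat}
    (h : PySem.List.index? l v = some j) : l.set j v = l := by
  rcases (PySem.List.index?_eq_some_iff l v j).mp h with ⟨pre, suf, rfl, rfl, -⟩
  exact pvSet_join pre v suf v

theorem pvALoop_ge {l : List Int} {i : Nat} (h : l.length ≤ i) : pvALoop l i = l := by
  rw [pvALoop]; simp [Nat.not_lt.mpr h]

theorem pvALoop_step {l : List Int} {i : Nat} (h : i < l.length) :
    pvALoop l i = pvALoop (pvAStep l i) (i + 1) := by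
  rw [pvALoop]; simp [h]

theorem pvAStep_skip {D : List Int} {c : Int} {T : List Int}
    (hc : c ≠ 103 ∧ c ≠ 102 ∧ c ≠ 101) : pvAStep (D ++ c :: T) D.length = D ++ c :: T := by
  unfold pvAStep
  rw [pvGetD_join]
  simp [hc.1, hc.2.1, hc.2.2]

theorem pvSkip (E : List Int) (hE : ∀ x ∈ E, x ≠ (103:Int) ∧ x ≠ 102 ∧ x ≠ 101) :
    ∀ D M, pvALoop (D ++ (E ++ M)) D.length = pvALoop ((D ++ E) ++ M) (D ++ E).length := by
  induction E with
  | nil => intro D M; simp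
  | cons c E ih =>
    intro D M
    have hsh : D ++ (c :: E ++ M) = D ++ c :: (E ++ M) := by simp
    have hlt : D.length < (D ++ c :: (E ++ M)).length := by simp
    rw [hsh, pvALoop_step hlt, pvAStep_skip (hE c (by simp))]
    have hre : D ++ c :: (E ++ M) = (D ++ [c]) ++ (E ++ M) := by simp
    have hlen : D.length + 1 = (D ++ [c]).length := by simp
    rw [hre, hlen, ih (fun x hx => hE x (by simp [hx])) (D ++ [c]) M]
    simp

theorem pvSkip_end (E : List Int) (hE : ∀ x ∈ E, x ≠ (103:Int) ∧ x ≠ 102 ∧ x ≠ 101)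
    (D : List Int) : pvALoop (D ++ E) D.length = D ++ E := by
  have h := pvSkip E hE D []
  rw [List.append_nil, List.append_nil] at h
  rw [h, pvALoop_ge le_rfl]

theorem pvSetSelf (v : Int) (hv : v = 101 ∨ v = 103) :
    ∀ n D M, pvALoop (D ++ (List.replicate n v ++ M)) D.length
           = pvALoop ((D ++ List.replicate n (0:Int)) ++ M) (D ++ List.replicate n (0:Int)).length := by
  intro n
  induction n with
  | zero => intro D M; simp
  | succ n ih =>
    intro D M
    have hlt : D.length < (D ++ (List.replicate (n+1) v ++ M)).length := by simp
    rw [pvALoop_step hlt]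
    have hstep : pvAStep (D ++ (List.replicate (n+1) v ++ M)) D.length
        = D ++ (0 :: (List.replicate n v ++ M)) := by
      rw [List.replicate_succ, List.cons_append]
      unfold pvAStep
      rw [pvGetD_join]
      rcases hv with rfl | rfl
      · rw [if_neg (by decide), if_neg (by decide), if_pos rfl, pvSet_join]
      · rw [if_pos rfl, pvSet_join]
    rw [hstep]
    have hre : D ++ (0 :: (List.replicate n v ++ M)) = (D ++ [0]) ++ (List.replicate n v ++ M) := by simp
    have hlen : D.length + 1 = (D ++ [(0:Int)]).length := by simp
    rw [hre, hlen, ih (D ++ [0]) M]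
    have : (D ++ [(0:Int)]) ++ List.replicate n (0:Int) = D ++ List.replicate (n+1) (0:Int) := by
      rw [List.replicate_succ]; simp
    rw [this]


-- ---- small facts about the tracked tail pvZP ----

theorem pvZP_zero (N : List Int) : pvZP N 0 = N := by simp [pvZP]

theorem pvZP_decomp (N : List Int) (p : Nat) (hp : p < N.length) :
    pvZP N p = List.replicate p 0 ++ N.getD p 0 :: N.drop (p + 1) := by
  rw [pvZP, List.getD_eq_getElem N 0 hp, List.getElem_cons_drop hp]

theorem pvZP_succ (N : List Int) (p : Nat) :
    pvZP N (p + 1) = List.replicate p 0 ++ 0 :: N.drop (p + 1) := by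
  rw [pvZP, show List.replicate (p+1) (0:Int) = List.replicate p 0 ++ [0] from List.replicate_succ' ..]
  simp

theorem pvZP_sum_succ (N : List Int) (p : Nat) (hp : p < N.length) :
    (pvZP N (p + 1)).sum = (pvZP N p).sum - N.getD p 0 := by
  rw [pvZP_succ, pvZP_decomp N p hp]
  simp

theorem pvZP_lt (N : List Int) (p : Nat) (hN : ∀ x ∈ N, x < (100:Int)) :
    ∀ x ∈ pvZP N p, x < (100:Int) := by
  intro x hx
  rcases List.mem_append.mp hx with hx | hx
  · rcases List.eq_of_mem_replicate hx with rfl; norm_num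
  · exact hN x (List.mem_of_mem_drop hx)

theorem pvDrop_le (N : List Int) (p : Nat) (hNs : N.Pairwise (fun a b : Int => b ≤ a))
    (hp : p < N.length) : ∀ y ∈ N.drop p, y ≤ N.getD p 0 := by
  intro y hy
  have hdec : N.drop p = N.getD p 0 :: N.drop (p + 1) := by
    rw [List.getD_eq_getElem N 0 hp, List.getElem_cons_drop hp]
  have hpw : (N.drop p).Pairwise (fun a b : Int => b ≤ a) :=
    List.Pairwise.sublist (List.drop_sublist p N) hNs
  rw [hdec] at hy hpw
  rcases List.mem_cons.mp hy with rfl | hy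
  · exact le_refl _
  · exact (List.pairwise_cons.mp hpw).1 y hy

-- ---- Python max on the normal-card pool ----

theorem pvMax_eq {l : List Int} {m : Int} (hm : m ∈ l) (hmax : ∀ y ∈ l, y ≤ m) :
    PySem.List.max? l (fun x => x) = some m := by
  cases hq : PySem.List.max? l (fun x => x) with
  | none =>
    rw [(PySem.List.max?_eq_none_iff l _).mp hq] at hm
    simp at hm
  | some m' =>
    have h1 : m' ∈ l := PySem.List.max?_mem hq
    have h2 : m ≤ m' := PySem.List.max?_isMax hq m hm
    have h3 : m' ≤ m := hmax m' h1
    rw [le_antisymm h3 h2]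

-- ---- decomposition of a descending list into value blocks ----

theorem pvBlock (l : List Int) (q : Int → Bool) (b c : Int) (hb : b = c - 1)
    (hq : ∀ x : Int, q x = true ↔ x ≤ c) :
    l.filter (fun x => decide (b < x) && q x) = List.replicate (l.count c) c := by
  have : ∀ x ∈ l, (decide (b < x) && q x) = (x == c) := by
    intro x _
    by_cases hx : x = c
    · have h1 : (b < c) := by omega
      have h2 : q c = true := (hq c).mpr le_rfl
      simp [hx, h1, h2]
    · by_cases hc : x ≤ c
      · have h1 : ¬ (b < x) := by omega
        simp [h1, hx]
      · have h1 : q x = false := by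
          cases hqx : q x
          · rfl
          · exact absurd ((hq x).mp hqx) hc
        simp [h1, hx]
  rw [List.filter_congr this, List.filter_beq]

theorem pvDecomp (l : List Int) (hl : l.Pairwise (fun a b : Int => b ≤ a)) :
    l = l.filter (fun x => decide (103 < x))
        ++ (List.replicate (l.count 103) (103:Int)
        ++ (List.replicate (l.count 102) (102:Int)
        ++ (List.replicate (l.count 101) (101:Int)
        ++ (List.replicate (l.count 100) (100:Int)
        ++ l.filter (fun x => decide (x < 100)))))) := by
  have pw : ∀ q : Int → Bool, (l.filter q).Pairwise (fun a b : Int => b ≤ a) :=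
    fun q => List.Pairwise.sublist (List.filter_sublist) hl
  have t1 := pvSplit 103 l hl
  have t2 := pvSplit 102 (l.filter (fun x => decide (x ≤ 103))) (pw _)
  have t3 := pvSplit 101 (l.filter (fun x => decide (x ≤ 102) && decide (x ≤ 103))) (pw _)
  have t4 := pvSplit 100 (l.filter (fun x => decide (x ≤ 101) && (decide (x ≤ 102) && decide (x ≤ 103)))) (pw _)
  have t5 := pvSplit 99 (l.filter (fun x => decide (x ≤ 100) && (decide (x ≤ 101) && (decide (x ≤ 102) && decide (x ≤ 103))))) (pw _)
  rw [List.filter_filter, List.filter_filter] at t2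
  rw [List.filter_filter, List.filter_filter] at t3
  rw [List.filter_filter, List.filter_filter] at t4
  rw [List.filter_filter, List.filter_filter] at t5
  rw [pvBlock l _ 102 103 (by norm_num) (fun x => by simp)] at t2
  rw [pvBlock l _ 101 102 (by norm_num) (fun x => by simp; omega)] at t3
  rw [pvBlock l _ 100 101 (by norm_num) (fun x => by simp; omega)] at t4
  rw [pvBlock l _ 99 100 (by norm_num) (fun x => by simp; omega)] at t5
  have t6 : l.filter (fun x => decide (x ≤ 99) && (decide (x ≤ 100) && (decide (x ≤ 101) && (decide (x ≤ 102) && decide (x ≤ 103)))))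
      = l.filter (fun x => decide (x < 100)) :=
    List.filter_congr (fun x _ => by by_cases hx : x < 100 <;> simp [hx] <;> omega)
  rw [t6] at t5
  exact t1.trans (by rw [t2, t3, t4, t5])

theorem pvFilterShape (G : List Int) (z k o h : Nat) (N : List Int) (p : Nat)
    (hG : ∀ x ∈ G, (103:Int) < x) (hN : ∀ x ∈ N, x < (100:Int)) :
    (G ++ (List.replicate z (0:Int) ++ (List.replicate k (102:Int) ++ (List.replicate o (101:Int)
      ++ (List.replicate h (100:Int) ++ pvZP N p))))).filter (fun c => decide (c < 100))
    = List.replicate z (0:Int) ++ pvZP N p := by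
  have hGf : G.filter (fun c => decide (c < 100)) = [] :=
    List.filter_eq_nil_iff.mpr (fun x hx => by have := hG x hx; simp; omega)
  have hZf : (pvZP N p).filter (fun c => decide (c < 100)) = pvZP N p :=
    List.filter_eq_self.mpr (fun x hx => by have := pvZP_lt N p hN x hx; simpa)
  simp [List.filter_append, List.filter_replicate, hGf, hZf]


-- ---- the 102 phase of A's loop, simulated against the counters of pvSub ----

theorem pvMain102 (G : List Int) (o h : Nat) (N : List Int)
    (hG : ∀ x ∈ G, (103:Int) < x) (hN : ∀ x ∈ N, x < (100:Int))
    (hNs : N.Pairwise (fun a b : Int => b ≤ a)) :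
    ∀ k z p, p ≤ N.length →
    (pvALoop (G ++ (List.replicate z (0:Int) ++ (List.replicate k (102:Int)
        ++ (List.replicate o (101:Int) ++ (List.replicate h (100:Int) ++ pvZP N p)))))
      (G.length + z)).sum
     = G.sum + (h:Int) * 100 + (pvZP N p).sum - pvSub N k p (z + p) := by
  intro k
  induction k with
  | zero =>
    intro z p hp
    have hE : ∀ x ∈ (List.replicate h (100:Int) ++ pvZP N p), x ≠ (103:Int) ∧ x ≠ 102 ∧ x ≠ 101 := by
      intro x hx
      rcases List.mem_append.mp hx with hx | hx
      · rcases List.eq_of_mem_replicate hx with rfl; norm_num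
      · have := pvZP_lt N p hN x hx
        exact ⟨by omega, by omega, by omega⟩
    have h0 : G ++ (List.replicate z (0:Int) ++ (List.replicate 0 (102:Int) ++ (List.replicate o (101:Int) ++ (List.replicate h (100:Int) ++ pvZP N p))))
        = (G ++ List.replicate z (0:Int)) ++ (List.replicate o (101:Int) ++ (List.replicate h (100:Int) ++ pvZP N p)) := by simp
    have hlen : G.length + z = (G ++ List.replicate z (0:Int)).length := by simp
    rw [h0, hlen, pvSetSelf 101 (Or.inl rfl) o (G ++ List.replicate z 0) _, pvSkip_end _ hE _]
    simp only [pvSub, List.sum_append, List.sum_replicate, smul_zero, nsmul_eq_mul]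
    ring
  | succ kk ih =>
    intro z p hp
    have hL : G ++ (List.replicate z (0:Int) ++ (List.replicate (kk+1) (102:Int) ++ (List.replicate o (101:Int) ++ (List.replicate h (100:Int) ++ pvZP N p))))
        = (G ++ List.replicate z (0:Int)) ++ 102 :: (List.replicate kk (102:Int) ++ (List.replicate o (101:Int) ++ (List.replicate h (100:Int) ++ pvZP N p))) := by
      rw [List.replicate_succ]; simp
    have hlen : G.length + z = (G ++ List.replicate z (0:Int)).length := by simp
    set D := G ++ List.replicate z (0:Int) with hD
    set T := List.replicate kk (102:Int) ++ (List.replicate o (101:Int) ++ (List.replicate h (100:Int) ++ pvZP N p)) with hT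
    have hlt : D.length < (D ++ 102 :: T).length := by simp
    rw [hL, hlen, pvALoop_step hlt]
    have hnc : (D ++ 102 :: T).filter (fun c => decide (c < 100)) = List.replicate z (0:Int) ++ pvZP N p := by
      rw [← hL]
      exact pvFilterShape G z (kk+1) o h N p hG hN
    -- common tail: after the self-zeroing step the loop state is (z+1, p') for some p'
    have hrez : ∀ X : List Int, D ++ (0:Int) :: X = G ++ (List.replicate (z+1) (0:Int) ++ X) := by
      intro X
      rw [hD, List.replicate_succ']
      simp
    by_cases hTake : p < N.length ∧ (0 < N.getD p 0 ∨ (z = 0 ∧ p = 0))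
    · -- A zeroes the tracked normal N[p]
      have hplen := hTake.1
      have hzdec : pvZP N p = List.replicate p 0 ++ N.getD p 0 :: N.drop (p+1) := pvZP_decomp N p hplen
      have hm100 : N.getD p 0 < 100 := hN _ (List.getD_eq_getElem N 0 hplen ▸ List.getElem_mem hplen)
      have hm_mem : N.getD p 0 ∈ List.replicate z (0:Int) ++ pvZP N p := by rw [hzdec]; simp
      have hm_max : ∀ y ∈ List.replicate z (0:Int) ++ pvZP N p, y ≤ N.getD p 0 := by
        intro y hy
        rcases List.mem_append.mp hy with hy | hy
        · rcases List.eq_of_mem_replicate hy with rfl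
          rcases hTake.2 with h' | ⟨hz0, -⟩
          · exact le_of_lt h'
          · rw [hz0] at hy; simp at hy
        · rw [pvZP] at hy
          rcases List.mem_append.mp hy with hy | hy
          · rcases List.eq_of_mem_replicate hy with rfl
            rcases hTake.2 with h' | ⟨-, hp0⟩
            · exact le_of_lt h'
            · rw [hp0] at hy; simp at hy
          · exact pvDrop_le N p hNs hplen y hy
      have hmax : PySem.List.max? (List.replicate z (0:Int) ++ pvZP N p) (fun x => x) = some (N.getD p 0) :=
        pvMax_eq hm_mem hm_max
      have hncne : ¬ (List.replicate z (0:Int) ++ pvZP N p = []) := by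
        intro hh; rw [hh] at hm_mem; simp at hm_mem
      have hshape : D ++ 102 :: T
          = (D ++ 102 :: (List.replicate kk (102:Int) ++ (List.replicate o (101:Int) ++ (List.replicate h (100:Int) ++ List.replicate p (0:Int))))) ++ N.getD p 0 :: N.drop (p+1) := by
        rw [hT, hzdec]; simp
      have hmnotin : N.getD p 0 ∉ (D ++ 102 :: (List.replicate kk (102:Int) ++ (List.replicate o (101:Int) ++ (List.replicate h (100:Int) ++ List.replicate p (0:Int))))) := by
        intro hmem
        have hmem' : N.getD p 0 ∈ G ∨ N.getD p 0 ∈ List.replicate z (0:Int) ∨ N.getD p 0 = 102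
            ∨ N.getD p 0 ∈ List.replicate kk (102:Int) ∨ N.getD p 0 ∈ List.replicate o (101:Int)
            ∨ N.getD p 0 ∈ List.replicate h (100:Int) ∨ N.getD p 0 ∈ List.replicate p (0:Int) := by
          rw [hD] at hmem
          simp only [List.append_assoc, List.mem_append, List.mem_cons] at hmem
          tauto
        rcases hmem' with hx | hx | hx | hx | hx | hx | hx
        · exact absurd (hG _ hx) (by omega)
        · rcases List.mem_replicate.mp hx with ⟨hz0, hx0⟩
          rcases hTake.2 with h' | ⟨h1, -⟩
          · omega
          · exact hz0 h1
        · omega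
        · rcases List.mem_replicate.mp hx with ⟨-, hx0⟩; omega
        · rcases List.mem_replicate.mp hx with ⟨-, hx0⟩; omega
        · rcases List.mem_replicate.mp hx with ⟨-, hx0⟩; omega
        · rcases List.mem_replicate.mp hx with ⟨hp0, hx0⟩
          rcases hTake.2 with h' | ⟨-, h2⟩
          · omega
          · exact hp0 h2
      have hidx : PySem.List.index? (D ++ 102 :: T) (N.getD p 0)
          = some (D ++ 102 :: (List.replicate kk (102:Int) ++ (List.replicate o (101:Int) ++ (List.replicate h (100:Int) ++ List.replicate p (0:Int))))).length := by
        rw [hshape, pvIndex_append_not_mem _ hmnotin, PySem.List.index?_cons_self]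
        simp
      have hstep : pvAStep (D ++ 102 :: T) D.length
          = D ++ 0 :: (List.replicate kk (102:Int) ++ (List.replicate o (101:Int) ++ (List.replicate h (100:Int) ++ pvZP N (p+1)))) := by
        simp only [pvAStep, pvGetD_join]
        rw [if_neg (by norm_num)]
        simp only [if_true]
        rw [hnc, if_neg hncne, hmax]
        simp only [Option.getD_some]
        rw [hidx]
        simp only [Option.getD_some]
        conv_lhs => rw [hshape]
        rw [pvSet_join]
        have hre : (D ++ 102 :: (List.replicate kk (102:Int) ++ (List.replicate o (101:Int) ++ (List.replicate h (100:Int) ++ List.replicate p (0:Int))))) ++ 0 :: N.drop (p+1)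
            = D ++ 102 :: (List.replicate kk (102:Int) ++ (List.replicate o (101:Int) ++ (List.replicate h (100:Int) ++ pvZP N (p+1)))) := by
          rw [pvZP_succ]; simp
        rw [hre, pvSet_join]
      rw [hstep, hrez, show D.length + 1 = G.length + (z+1) by rw [hD]; simp; omega]
      rw [ih (z+1) (p+1) (by omega)]
      rw [pvZP_sum_succ N p hplen]
      have hcond : p < N.length ∧ (0 < N.getD p 0 ∨ z + p = 0) := by
        rcases hTake.2 with h' | ⟨h1, h2⟩
        · exact ⟨hplen, Or.inl h'⟩
        · exact ⟨hplen, Or.inr (by omega)⟩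
      rw [show pvSub N (kk+1) p (z+p) = N.getD p 0 + pvSub N kk (p+1) (z+p+2) from by
        simp only [pvSub, if_pos hcond]]
      rw [show (z+1) + (p+1) = z + p + 2 by omega]
      ring
    · by_cases hemp : z = 0 ∧ p = 0 ∧ N = []
      · -- no normal cards at all: only the 102 itself is zeroed
        rcases hemp with ⟨hz0, hp0, hN0⟩
        have hncnil : List.replicate z (0:Int) ++ pvZP N p = [] := by
          rw [hz0, hp0, hN0, pvZP]; simp
        have hstep : pvAStep (D ++ 102 :: T) D.length = D ++ 0 :: T := by
          simp only [pvAStep, pvGetD_join]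
          rw [if_neg (by norm_num)]
          simp only [if_true]
          rw [hnc, if_pos hncnil, pvSet_join]
        rw [hstep, hrez, show D.length + 1 = G.length + (z+1) by rw [hD]; simp; omega]
        rw [hT, ih (z+1) p hp]
        have hcond : ¬ (p < N.length ∧ (0 < N.getD p 0 ∨ z + p = 0)) := by
          rw [hN0, hp0]; simp
        rw [show pvSub N (kk+1) p (z+p) = pvSub N kk p (z+p+1) from by
          simp only [pvSub, if_neg hcond]]
        rw [show (z+1) + p = z + p + 1 by omega]
      · -- the maximum of the pool is one of the zeros: the list is unchanged
        have hzp : 0 < z + p := by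
          by_contra hc
          have hz0 : z = 0 := by omega
          have hp0 : p = 0 := by omega
          have hNne : N ≠ [] := fun hh => hemp ⟨hz0, hp0, hh⟩
          have hlen0 : 0 < N.length := List.length_pos_iff.mpr hNne
          exact hTake ⟨by omega, Or.inr ⟨hz0, hp0⟩⟩
        have hm_mem : (0:Int) ∈ List.replicate z (0:Int) ++ pvZP N p := by
          rcases Nat.lt_or_ge 0 z with hz | hz
          · exact List.mem_append.mpr (Or.inl (List.mem_replicate.mpr ⟨by omega, rfl⟩))
          · have hp0 : 0 < p := by omega
            exact List.mem_append.mpr (Or.inr (by rw [pvZP]; exact List.mem_append.mpr (Or.inl (List.mem_replicate.mpr ⟨by omega, rfl⟩))))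
        have hm_max : ∀ y ∈ List.replicate z (0:Int) ++ pvZP N p, y ≤ (0:Int) := by
          intro y hy
          rcases List.mem_append.mp hy with hy | hy
          · rcases List.eq_of_mem_replicate hy with rfl; exact le_rfl
          · rw [pvZP] at hy
            rcases List.mem_append.mp hy with hy | hy
            · rcases List.eq_of_mem_replicate hy with rfl; exact le_rfl
            · rcases Nat.lt_or_ge p N.length with hplen | hplen
              · have hmle : N.getD p 0 ≤ 0 := by
                  by_contra hcc
                  exact hTake ⟨hplen, Or.inl (by omega)⟩
                exact le_trans (pvDrop_le N p hNs hplen y hy) hmle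
              · rw [List.drop_eq_nil_of_le hplen] at hy
                simp at hy
        have hmax : PySem.List.max? (List.replicate z (0:Int) ++ pvZP N p) (fun x => x) = some 0 :=
          pvMax_eq hm_mem hm_max
        have hncne : ¬ (List.replicate z (0:Int) ++ pvZP N p = []) := by
          intro hh; rw [hh] at hm_mem; simp at hm_mem
        have hmemL : (0:Int) ∈ D ++ 102 :: T := by
          have := hnc ▸ hm_mem
          exact List.mem_of_mem_filter this
        obtain ⟨j, hj⟩ : ∃ j, PySem.List.index? (D ++ 102 :: T) 0 = some j := by
          rcases Option.isSome_iff_exists.mp ((PySem.List.index?_isSome_iff _ _).mpr hmemL) with ⟨j, hj⟩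
          exact ⟨j, hj⟩
        have hstep : pvAStep (D ++ 102 :: T) D.length = D ++ 0 :: T := by
          simp only [pvAStep, pvGetD_join]
          rw [if_neg (by norm_num)]
          simp only [if_true]
          rw [hnc, if_neg hncne, hmax]
          simp only [Option.getD_some]
          rw [hj]
          simp only [Option.getD_some]
          rw [pvSet_index_self hj, pvSet_join]
        rw [hstep, hrez, show D.length + 1 = G.length + (z+1) by rw [hD]; simp; omega]
        rw [hT, ih (z+1) p hp]
        have hcond : ¬ (p < N.length ∧ (0 < N.getD p 0 ∨ z + p = 0)) := by
          intro ⟨h1, h2⟩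
          rcases h2 with h2 | h2
          · exact hTake ⟨h1, Or.inl h2⟩
          · omega
        rw [show pvSub N (kk+1) p (z+p) = pvSub N kk p (z+p+1) from by
          simp only [pvSub, if_neg hcond]]
        rw [show (z+1) + p = z + p + 1 by omega]

-- ---- B-side: closed form of pvSub outside the change region ----

theorem pvNegStop (N : List Int) :
    ∀ (k p z : Nat), 0 < z → (N.length ≤ p ∨ N.getD p 0 ≤ 0) → pvSub N k p z = 0 := by
  intro k
  induction k with
  | zero => intro p z _ _; rfl
  | succ n ih =>
    intro p z hz hstop
    have hcond : ¬ (p < N.length ∧ (0 < N.getD p 0 ∨ z = 0)) := by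
      rintro ⟨h1, h2 | h2⟩
      · rcases hstop with h | h <;> omega
      · omega
    simp only [pvSub, if_neg hcond]
    exact ih p (z+1) (by omega) hstop

theorem pvTakeZeroSum (N : List Int) (p m : Nat)
    (hnn : ∀ i, p ≤ i → i < p + m → i < N.length → 0 ≤ N.getD i 0)
    (hle : ∀ x ∈ N.drop p, x ≤ 0) :
    ((N.drop p).take m).sum = 0 := by
  apply List.sum_eq_zero
  intro x hx
  rcases List.mem_iff_getElem.mp hx with ⟨j, hj, hxe⟩
  simp only [List.length_take, List.length_drop] at hj
  have hplen : p + j < N.length := by omega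
  have hjm : j < m := by omega
  have h2 : x ≤ 0 := hle x (List.mem_of_mem_take hx)
  have h1 : 0 ≤ x := by
    rw [← hxe, List.getElem_take, List.getElem_drop]
    have := hnn (p+j) (by omega) (by omega) hplen
    rwa [List.getD_eq_getElem N 0 hplen] at this
  omega

theorem pvLemNN (N : List Int) (hNs : N.Pairwise (fun a b : Int => b ≤ a)) :
    ∀ (k p z : Nat), (∀ i, p ≤ i → i < p + k → i < N.length → 0 ≤ N.getD i 0) →
    pvSub N k p z = ((N.drop p).take k).sum := by
  intro k
  induction k with
  | zero => intro p z _; simp [pvSub]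
  | succ n ih =>
    intro p z hnn
    by_cases hp : p < N.length
    · have hdec : N.drop p = N.getD p 0 :: N.drop (p+1) := by
        rw [List.getD_eq_getElem N 0 hp, List.getElem_cons_drop hp]
      have h0 : 0 ≤ N.getD p 0 := hnn p le_rfl (by omega) hp
      by_cases hpos : 0 < N.getD p 0
      · have hcond : p < N.length ∧ (0 < N.getD p 0 ∨ z = 0) := ⟨hp, Or.inl hpos⟩
        simp only [pvSub, if_pos hcond]
        rw [ih (p+1) (z+2) (fun i h1 h2 h3 => hnn i (by omega) (by omega) h3)]
        rw [hdec]
        simp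
      · have hz0 : N.getD p 0 = 0 := by omega
        have hle : ∀ x ∈ N.drop p, x ≤ 0 := fun x hx => hz0 ▸ pvDrop_le N p hNs hp x hx
        have hle1 : ∀ x ∈ N.drop (p+1), x ≤ 0 := by
          intro x hx
          apply hle
          rw [hdec]
          exact List.mem_cons_of_mem _ hx
        have s1 : ((N.drop p).take (n+1)).sum = 0 := pvTakeZeroSum N p (n+1) hnn hle
        by_cases hz : z = 0
        · have hcond : p < N.length ∧ (0 < N.getD p 0 ∨ z = 0) := ⟨hp, Or.inr hz⟩
          simp only [pvSub, if_pos hcond]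
          rw [ih (p+1) (z+2) (fun i h1 h2 h3 => hnn i (by omega) (by omega) h3)]
          rw [pvTakeZeroSum N (p+1) n (fun i h1 h2 h3 => hnn i (by omega) (by omega) h3) hle1,
            s1, hz0]
          norm_num
        · have hcond : ¬ (p < N.length ∧ (0 < N.getD p 0 ∨ z = 0)) := by
            rintro ⟨h1, h2 | h2⟩ <;> omega
          simp only [pvSub, if_neg hcond]
          rw [ih p (z+1) (fun i h1 h2 h3 => hnn i (by omega) (by omega) h3)]
          rw [pvTakeZeroSum N p n (fun i h1 h2 h3 => hnn i (by omega) (by omega) h3) hle, s1]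
    · have hcond : ¬ (p < N.length ∧ (0 < N.getD p 0 ∨ z = 0)) := fun h => hp h.1
      simp only [pvSub, if_neg hcond]
      rw [ih p (z+1) (fun i h1 h2 h3 => hnn i (by omega) (by omega) h3)]
      rw [List.drop_eq_nil_of_le (by omega)]
      simp

theorem pvSignSplit (N : List Int) (hNs : N.Pairwise (fun a b : Int => b ≤ a)) :
    N = N.filter (fun x => decide (0 ≤ x)) ++ N.filter (fun x => decide (x < 0)) := by
  have h := pvSplit (-1) N hNs
  have e1 : N.filter (fun x => decide ((-1:Int) < x)) = N.filter (fun x => decide (0 ≤ x)) :=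
    List.filter_congr (fun x _ => by simp only [decide_eq_decide]; omega)
  have e2 : N.filter (fun x => decide (x ≤ (-1:Int))) = N.filter (fun x => decide (x < 0)) :=
    List.filter_congr (fun x _ => by simp only [decide_eq_decide]; omega)
  rw [e1, e2] at h
  exact h

theorem pvSubChar (N : List Int) (hNs : N.Pairwise (fun a b : Int => b ≤ a)) (k t : Nat)
    (hnd : ¬ (0 < N.countP (fun c => decide (c < 0)) ∧
              N.countP (fun c => decide (0 ≤ c)) < k ∧
              ¬ (t = 0 ∧ N.countP (fun c => decide (0 ≤ c)) = 0 ∧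
                 min k (N.countP (fun c => decide (c < 0))) = 1))) :
    pvSub N k 0 t = (N.take k).sum := by
  set nn := N.countP (fun c => decide (0 ≤ c)) with hnn
  set ng := N.countP (fun c => decide (c < 0)) with hng
  have hlen2 : N.length = nn + ng := by
    rw [hnn, hng, List.countP_eq_length_filter, List.countP_eq_length_filter]
    simpa using congrArg List.length (pvSignSplit N hNs)
  have hPfacts : ∀ i, i < nn → i < N.length → 0 ≤ N.getD i 0 := by
    intro i hi hil
    have hlenP : (N.filter (fun x => decide (0 ≤ x))).length = nn := by
      rw [hnn, List.countP_eq_length_filter]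
    have hiP : i < (N.filter (fun x => decide (0 ≤ x))).length := by omega
    have hgv : N.getD i 0 = (N.filter (fun x => decide (0 ≤ x))).getD i 0 := by
      conv_lhs => rw [pvSignSplit N hNs]
      exact List.getD_append _ _ 0 i hiP
    rw [hgv, List.getD_eq_getElem _ 0 hiP]
    have := List.of_mem_filter (List.getElem_mem hiP)
    simpa using this
  by_cases hg : ng = 0
  · have hall : ∀ i, i < N.length → 0 ≤ N.getD i 0 := by
      intro i hil
      exact hPfacts i (by omega) hil
    have := pvLemNN N hNs k 0 t (fun i _ _ h3 => hall i h3)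
    simpa using this
  · by_cases hk : k ≤ nn
    · have := pvLemNN N hNs k 0 t (fun i _ h2 h3 => hPfacts i (by omega) h3)
      simpa using this
    · have hexc : t = 0 ∧ nn = 0 ∧ min k ng = 1 := by
        by_contra hx
        exact hnd ⟨by omega, by omega, hx⟩
      obtain ⟨ht, hnn0, hmin⟩ := hexc
      subst ht
      have hnlen : 0 < N.length := by omega
      have hneg : ∀ i, i < N.length → N.getD i 0 < 0 := by
        intro i hil
        by_contra hge
        have hmem : N.getD i 0 ∈ N := List.getD_eq_getElem N 0 hil ▸ List.getElem_mem hil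
        have : 0 < nn := by
          rw [hnn]
          refine List.countP_pos_iff.mpr ⟨N.getD i 0, hmem, by
            simp only [decide_eq_true_eq]; omega⟩
        omega
      obtain ⟨k', rfl⟩ : ∃ k', k = k' + 1 := ⟨k - 1, by omega⟩
      have hstep : pvSub N (k' + 1) 0 0 = N.getD 0 0 + pvSub N k' 1 2 := by
        simp [pvSub, hnlen]
      have hrest : pvSub N k' 1 2 = 0 := by
        apply pvNegStop N k' 1 2 (by omega)
        by_cases h1 : 1 < N.length
        · exact Or.inr (le_of_lt (hneg 1 h1))
        · exact Or.inl (by omega)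
      rw [hstep, hrest]
      have hN0 : N.getD 0 0 :: N.drop 1 = N := by
        rw [List.getD_eq_getElem N 0 hnlen]
        exact List.getElem_cons_drop hnlen
      have htake1 : N.take 1 = [N.getD 0 0] := by
        conv_lhs => rw [← hN0]
        rfl
      by_cases hk' : k' = 0
      · subst hk'
        rw [show (0:Nat) + 1 = 1 from rfl, htake1]
        simp
      · have hlen1 : N.length = 1 := by omega
        have hNs1 : N.sum = N.getD 0 0 := by
          conv_lhs => rw [← hN0]
          rw [List.drop_eq_nil_of_le (by omega)]
          simp
        rw [List.take_of_length_le (by omega), hNs1]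
        simp

-- ---- the shared closed form, then the main agreement theorem ----

theorem pv_forms (cards : List Int) :
    ∃ N : List Int, N.Pairwise (fun a b : Int => b ≤ a) ∧
      N.countP (fun c => decide (0 ≤ c)) = cards.countP (fun c => decide (0 ≤ c ∧ c < 100)) ∧
      N.countP (fun c => decide (c < 0)) = cards.countP (fun c => decide (c < 0)) ∧
      sum_of_others_cards cards = sum_of_others_cards_alt cards
        + ((N.take (cards.count 102)).sum - pvSub N (cards.count 102) 0 (cards.count 103)) := by
  set s := PySem.List.sorted cards (fun x => x) true with hs
  have hperm : s.Perm cards := PySem.List.sorted_perm ..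
  have hpw : s.Pairwise (fun a b : Int => b ≤ a) := PySem.List.sorted_pairwise_rev ..
  set G := s.filter (fun x => decide ((103:Int) < x)) with hGdef
  set N := s.filter (fun x => decide (x < (100:Int))) with hNdef
  set t := s.count 103 with htdef
  set k := s.count 102 with hkdef
  set o := s.count 101 with hodef
  set hh := s.count 100 with hhdef
  have hdec := pvDecomp s hpw
  have hG : ∀ x ∈ G, (103:Int) < x := by
    intro x hx
    have := (List.mem_filter.mp hx).2
    simpa using this
  have hN : ∀ x ∈ N, x < (100:Int) := by
    intro x hx
    have := (List.mem_filter.mp hx).2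
    simpa using this
  have hNpw : N.Pairwise (fun a b : Int => b ≤ a) :=
    List.Pairwise.sublist (List.filter_sublist) hpw
  -- ---- the A side ----
  have hGE : ∀ x ∈ G, x ≠ (103:Int) ∧ x ≠ 102 ∧ x ≠ 101 := by
    intro x hx
    have := hG x hx
    exact ⟨by omega, by omega, by omega⟩
  have hA : sum_of_others_cards cards
      = G.sum + (hh:Int) * 100 + N.sum - pvSub N k 0 t := by
    show (pvALoop s 0).sum = _
    conv_lhs => rw [hdec]
    have hskipG := pvSkip G hGE []
      (List.replicate t (103:Int) ++ (List.replicate k (102:Int) ++ (List.replicate o (101:Int) ++ (List.replicate hh (100:Int) ++ N))))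
    simp only [List.nil_append, List.length_nil] at hskipG
    rw [hskipG]
    rw [pvSetSelf 103 (Or.inr rfl) t G
      (List.replicate k (102:Int) ++ (List.replicate o (101:Int) ++ (List.replicate hh (100:Int) ++ N)))]
    have hre : (G ++ List.replicate t (0:Int)) ++ (List.replicate k (102:Int) ++ (List.replicate o (101:Int) ++ (List.replicate hh (100:Int) ++ N)))
        = G ++ (List.replicate t (0:Int) ++ (List.replicate k (102:Int) ++ (List.replicate o (101:Int) ++ (List.replicate hh (100:Int) ++ pvZP N 0)))) := by
      rw [pvZP_zero]; simp
    have hrelen : (G ++ List.replicate t (0:Int)).length = G.length + t := by simp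
    rw [hre, hrelen, pvMain102 G o hh N hG hN hNpw k t 0 (by omega), pvZP_zero]
    norm_num
  -- ---- the B side ----
  have hcount : ((PySem.List.count cards 102 : Nat) : Int) = (k : Int) := by
    rw [PySem.List.count_eq]
    exact_mod_cast (hperm.count_eq 102).symm
  have hNasc : PySem.List.sorted (cards.filter (fun c => decide (c < 100))) (fun x => x) false
      = N.reverse := by
    refine List.Perm.eq_of_pairwise (le := fun a b : Int => a ≤ b)
      (fun a b _ _ h1 h2 => le_antisymm h1 h2) (PySem.List.sorted_pairwise ..) ?_ ?_
    · exact List.pairwise_reverse.mpr hNpw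
    · exact ((PySem.List.sorted_perm ..).trans (hperm.filter _).symm).trans
        (List.reverse_perm N).symm
  have hkeep : (max ((N.reverse.length : Int) - ((PySem.List.count cards 102 : Nat) : Int)) 0)
      = ((N.length - k : Nat) : Int) := by
    rw [hcount, List.length_reverse]
    omega
  have hHi : (cards.filter pvHiP).sum = G.sum + (hh:Int) * 100 := by
    have hp1 : (cards.filter pvHiP).Perm (s.filter pvHiP) := (hperm.filter _).symm
    rw [hp1.sum_eq]
    have hsf : s.filter pvHiP = G ++ List.replicate hh (100:Int) := by
      conv_lhs => rw [hdec]
      have hGf : G.filter pvHiP = G := List.filter_eq_self.mpr (fun x hx => by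
        have := hG x hx
        simp only [pvHiP]
        simp
        omega)
      have hNf : N.filter pvHiP = [] := List.filter_eq_nil_iff.mpr (fun x hx => by
        have := hN x hx
        simp only [pvHiP]
        simp
        omega)
      have c103 : pvHiP 103 = false := by decide
      have c102 : pvHiP 102 = false := by decide
      have c101 : pvHiP 101 = false := by decide
      have c100 : pvHiP 100 = true := by decide
      simp only [List.filter_append, List.filter_replicate, c103, c102, c101, c100]
      simp only [← hGdef, ← hNdef]
      rw [hGf, hNf]
      simp
      exact hhdef.symm
    rw [hsf]
    simp [List.sum_append, List.sum_replicate, nsmul_eq_mul]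
  have hB : sum_of_others_cards_alt cards
      = (G.sum + (hh:Int) * 100) + (N.drop (N.length - (N.length - k))).sum := by
    show (cards.filter pvHiP).sum
        + (PySem.List.slice (PySem.List.sorted (cards.filter (fun c => decide (c < 100))) (fun x => x) false) none
            (some (max (((PySem.List.sorted (cards.filter (fun c => decide (c < 100))) (fun x => x) false).length : Int)
              - ((PySem.List.count cards 102 : Nat) : Int)) 0))).sum = _
    rw [hHi, hNasc, hkeep, PySem.List.slice_to _ (by positivity)]
    rw [Int.toNat_natCast, List.take_reverse, List.sum_reverse]
  -- ---- putting the two sides together ----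
  -- bridge the countP/count facts of D_ from cards to N
  have hbnn : N.countP (fun c => decide (0 ≤ c)) = cards.countP (fun c => decide (0 ≤ c ∧ c < 100)) := by
    rw [hNdef, List.countP_filter, hperm.countP_eq]
    exact List.countP_congr (fun x _ => by
      by_cases hx : (0:Int) ≤ x ∧ x < 100
      · simp [hx.1, hx.2]
      · by_cases h0 : (0:Int) ≤ x
        · have : ¬ x < (100:Int) := fun hcc => hx ⟨h0, hcc⟩
          simp [h0, this]
        · simp [h0, fun hcc : (0:Int) ≤ x ∧ x < 100 => h0 hcc.1])
  have hbng : N.countP (fun c => decide (c < 0)) = cards.countP (fun c => decide (c < 0)) := by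
    rw [hNdef, List.countP_filter, hperm.countP_eq]
    exact List.countP_congr (fun x _ => by
      by_cases hx : x < (0:Int)
      · simp [hx, show x < (100:Int) by omega]
      · simp [hx])
  have hbk : cards.count 102 = k := (hperm.count_eq 102).symm
  have hbt : cards.count 103 = t := (hperm.count_eq 103).symm
  have hmin : N.length - (N.length - k) = min k N.length := by omega
  have htk : N.take (min k N.length) = N.take k := by
    by_cases h : k ≤ N.length
    · rw [min_eq_left h]
    · rw [min_eq_right (by omega), List.take_length, List.take_of_length_le (by omega)]
  have hds : (N.drop (N.length - (N.length - k))).sum = N.sum - (N.take k).sum := by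
    rw [hmin]
    have h1 := congrArg List.sum (List.take_append_drop (min k N.length) N)
    rw [List.sum_append, htk] at h1
    omega
  refine ⟨N, hNpw, hbnn, hbng, ?_⟩
  rw [hA, hB, hds, hbk, hbt]
  ring

theorem pv_main (cards : List Int) (hnd : ¬ D_sum_of_others_cards cards) :
    sum_of_others_cards cards = sum_of_others_cards_alt cards := by
  obtain ⟨N, hNpw, hbnn, hbng, hform⟩ := pv_forms cards
  simp only [D_sum_of_others_cards] at hnd
  have hD' : ¬ (0 < N.countP (fun c => decide (c < 0)) ∧
      N.countP (fun c => decide (0 ≤ c)) < cards.count 102 ∧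
      ¬ (cards.count 103 = 0 ∧ N.countP (fun c => decide (0 ≤ c)) = 0 ∧
         min (cards.count 102) (N.countP (fun c => decide (c < 0))) = 1)) := by
    rintro ⟨h1, h2, h3⟩
    rw [hbng] at h1
    rw [hbnn] at h2 h3
    rw [hbng] at h3
    exact hnd ⟨h1, h2, by omega⟩
  have hsub := pvSubChar N hNpw (cards.count 102) (cards.count 103) hD'
  rw [hform, hsub]
  ring

-- ---- tightness: inside D_ the two programs always differ ----

theorem pvSumNeg : ∀ (l : List Int), l ≠ [] → (∀ x ∈ l, x < 0) → l.sum < 0 := by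
  intro l
  induction l with
  | nil => intro h _; exact absurd rfl h
  | cons a tl ih =>
    intro _ hneg
    rw [List.sum_cons]
    have ha := hneg a (by simp)
    by_cases htl : tl = []
    · rw [htl]
      simpa using ha
    · have := ih htl (fun x hx => hneg x (by simp [hx]))
      omega

-- pointwise sign of entries of a descending list, read off a countP threshold
theorem pvCountFacts (N : List Int) (hNs : N.Pairwise (fun a b : Int => b ≤ a)) (c : Int) :
    ∀ i, i < N.length →
    ((i < N.countP (fun x => decide (c < x)) → c < N.getD i 0) ∧
     (N.countP (fun x => decide (c < x)) ≤ i → N.getD i 0 ≤ c)) := by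
  intro i hil
  have hsp := pvSplit c N hNs
  have hlenP : (N.filter (fun x => decide (c < x))).length = N.countP (fun x => decide (c < x)) :=
    List.countP_eq_length_filter.symm
  have hlen : N.length
      = (N.filter (fun x => decide (c < x))).length + (N.filter (fun x => decide (x ≤ c))).length := by
    conv_lhs => rw [hsp]
    exact List.length_append
  constructor
  · intro hi
    have hiP : i < (N.filter (fun x => decide (c < x))).length := by omega
    have hgv : N.getD i 0 = (N.filter (fun x => decide (c < x))).getD i 0 := by
      conv_lhs => rw [hsp]
      exact List.getD_append _ _ 0 i hiP
    rw [hgv, List.getD_eq_getElem _ 0 hiP]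
    have := List.of_mem_filter (List.getElem_mem hiP)
    simpa using this
  · intro hi
    have hiP : (N.filter (fun x => decide (c < x))).length ≤ i := by omega
    have hiQ : i - (N.filter (fun x => decide (c < x))).length
        < (N.filter (fun x => decide (x ≤ c))).length := by omega
    have hgv : N.getD i 0
        = (N.filter (fun x => decide (x ≤ c))).getD (i - (N.filter (fun x => decide (c < x))).length) 0 := by
      conv_lhs => rw [hsp]
      exact List.getD_append_right _ _ 0 i hiP
    rw [hgv, List.getD_eq_getElem _ 0 hiQ]
    have := List.of_mem_filter (List.getElem_mem hiQ)
    simpa using this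

-- closed form of pvSub: the positive prefix is taken, then at most one nonpositive head
theorem pvSubFullAux (N : List Int) (pos : Nat) (hpl : pos ≤ N.length)
    (hpos : ∀ i, i < pos → i < N.length → 0 < N.getD i 0)
    (hnp : ∀ i, pos ≤ i → i < N.length → N.getD i 0 ≤ 0) :
    ∀ (k p z : Nat), p ≤ pos →
    pvSub N k p z = ((N.drop p).take (min k (pos - p))).sum
      + (if z = 0 ∧ p = pos ∧ 1 ≤ k ∧ p < N.length then N.getD p 0 else 0) := by
  intro k
  induction k with
  | zero => intro p z hp; simp [pvSub]
  | succ n ih =>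
    intro p z hp
    by_cases hpp : p < pos
    · have hplen : p < N.length := by omega
      have hNp : 0 < N.getD p 0 := hpos p hpp hplen
      have hcond : p < N.length ∧ (0 < N.getD p 0 ∨ z = 0) := ⟨hplen, Or.inl hNp⟩
      simp only [pvSub, if_pos hcond]
      rw [ih (p+1) (z+2) (by omega)]
      have hdec : N.drop p = N.getD p 0 :: N.drop (p+1) := by
        rw [List.getD_eq_getElem N 0 hplen, List.getElem_cons_drop hplen]
      have hmin : min (n+1) (pos - p) = (min n (pos - (p+1))) + 1 := by omega
      rw [hdec, hmin, List.take_succ_cons, List.sum_cons]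
      rw [if_neg (show ¬ (z = 0 ∧ p = pos ∧ 1 ≤ n + 1 ∧ p < N.length) by
            rintro ⟨-, h, -, -⟩; omega),
          if_neg (show ¬ (z + 2 = 0 ∧ p + 1 = pos ∧ 1 ≤ n ∧ p + 1 < N.length) by
            rintro ⟨h, -, -, -⟩; omega)]
      ring
    · have hppos : p = pos := by omega
      have hmin0 : min (n+1) (pos - p) = 0 := by omega
      rw [hmin0, List.take_zero, List.sum_nil, zero_add]
      by_cases hplen : p < N.length
      · have hNp : N.getD p 0 ≤ 0 := hnp p (by omega) hplen
        by_cases hz : z = 0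
        · have hcond : p < N.length ∧ (0 < N.getD p 0 ∨ z = 0) := ⟨hplen, Or.inr hz⟩
          simp only [pvSub, if_pos hcond]
          rw [pvNegStop N n (p+1) (z+2) (by omega) (by
            by_cases h1 : p + 1 < N.length
            · exact Or.inr (hnp (p+1) (by omega) h1)
            · exact Or.inl (by omega))]
          rw [if_pos ⟨hz, hppos, by omega, hplen⟩]
          simp
        · have hcond : ¬ (p < N.length ∧ (0 < N.getD p 0 ∨ z = 0)) := by
            rintro ⟨-, h | h⟩ <;> omega
          simp only [pvSub, if_neg hcond]
          rw [pvNegStop N n p (z+1) (by omega) (Or.inr hNp)]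
          rw [if_neg (by rintro ⟨h, -, -, -⟩; omega)]
      · have hcond : ¬ (p < N.length ∧ (0 < N.getD p 0 ∨ z = 0)) := fun h => hplen h.1
        simp only [pvSub, if_neg hcond]
        rw [pvNegStop N n p (z+1) (by omega) (Or.inl (by omega))]
        rw [if_neg (by rintro ⟨-, -, -, h⟩; exact hplen h)]

-- A's subtraction differs from B's whenever D_ holds (stated over the sorted normals N)
theorem pvNe (N : List Int) (hNs : N.Pairwise (fun a b : Int => b ≤ a)) (k t : Nat)
    (h1 : 0 < N.countP (fun c => decide (c < 0)))
    (h2 : N.countP (fun c => decide (0 ≤ c)) < k)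
    (h3 : 1 < t + N.countP (fun c => decide (0 ≤ c))
            + min k (N.countP (fun c => decide (c < 0)))) :
    (N.take k).sum ≠ pvSub N k 0 t := by
  set nn := N.countP (fun c => decide (0 ≤ c)) with hnnd
  set ng := N.countP (fun c => decide (c < 0)) with hngd
  set pos := N.countP (fun c => decide (0 < c)) with hposd
  have hb1 : N.countP (fun x => decide ((-1:Int) < x)) = nn := by
    rw [hnnd]
    exact List.countP_congr (fun x _ => by simp only [decide_eq_true_eq]; omega)
  have hb0 : N.countP (fun x => decide ((0:Int) < x)) = pos := rfl
  have hlen2 : N.length = nn + ng := by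
    rw [hnnd, hngd, List.countP_eq_length_filter, List.countP_eq_length_filter]
    simpa using congrArg List.length (pvSignSplit N hNs)
  have hposnn : pos ≤ nn := by
    rw [hposd, hnnd]
    exact List.countP_mono_left (fun x _ h => by simp at h ⊢; omega)
  have hpos : ∀ i, i < pos → i < N.length → 0 < N.getD i 0 := fun i hi hil =>
    (pvCountFacts N hNs 0 i hil).1 (by rw [hb0]; omega)
  have hnonpos : ∀ i, pos ≤ i → i < N.length → N.getD i 0 ≤ 0 := fun i hi hil =>
    (pvCountFacts N hNs 0 i hil).2 (by rw [hb0]; omega)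
  have hnonneg : ∀ i, i < nn → i < N.length → 0 ≤ N.getD i 0 := fun i hi hil => by
    have := (pvCountFacts N hNs (-1) i hil).1 (by rw [hb1]; omega)
    omega
  have hneg : ∀ i, nn ≤ i → i < N.length → N.getD i 0 < 0 := fun i hi hil => by
    have := (pvCountFacts N hNs (-1) i hil).2 (by rw [hb1]; omega)
    omega
  have hsub := pvSubFullAux N pos (by rw [hposd]; exact List.countP_le_length) hpos hnonpos k 0 t (by omega)
  rw [List.drop_zero] at hsub
  have hminpos : min k (pos - 0) = pos := by omega
  rw [hminpos] at hsub
  set m := min k N.length with hm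
  have hmnn : nn < m := by omega
  have hmle : m ≤ N.length := by omega
  have htkm : N.take k = N.take m := by
    by_cases h : k ≤ N.length
    · rw [hm, min_eq_left h]
    · rw [hm, min_eq_right (by omega), List.take_length, List.take_of_length_le (by omega)]
  have hsp1 : N.take m = N.take pos ++ (N.drop pos).take (m - pos) := by
    conv_lhs => rw [show m = pos + (m - pos) by omega]
    exact List.take_add
  have hsp2 : (N.drop pos).take (m - pos)
      = (N.drop pos).take (nn - pos) ++ (N.drop nn).take (m - nn) := by
    conv_lhs => rw [show m - pos = (nn - pos) + (m - nn) by omega]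
    rw [List.take_add, List.drop_drop, show pos + (nn - pos) = nn by omega]
  have hzsum : ((N.drop pos).take (nn - pos)).sum = 0 := by
    apply pvTakeZeroSum N pos (nn - pos)
    · intro i hi1 hi2 hi3
      exact hnonneg i (by omega) hi3
    · intro x hx
      rcases List.mem_iff_getElem.mp hx with ⟨j, hj, rfl⟩
      rw [List.getElem_drop]
      have hjl : pos + j < N.length := by
        simp only [List.length_drop] at hj
        omega
      have := hnonpos (pos + j) (by omega) hjl
      rwa [List.getD_eq_getElem N 0 hjl] at this
  have hLneg : ∀ x ∈ (N.drop nn).take (m - nn), x < 0 := by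
    intro x hx
    rcases List.mem_iff_getElem.mp hx with ⟨j, hj, rfl⟩
    rw [List.getElem_take, List.getElem_drop]
    have hjl : nn + j < N.length := by
      simp only [List.length_take, List.length_drop] at hj
      omega
    have := hneg (nn + j) (by omega) hjl
    rwa [List.getD_eq_getElem N 0 hjl] at this
  have hLne : (N.drop nn).take (m - nn) ≠ [] := by
    have hl : ((N.drop nn).take (m - nn)).length = m - nn := by
      simp only [List.length_take, List.length_drop]
      omega
    intro h
    rw [h] at hl
    simp at hl
    omega
  have hLsum : ((N.drop nn).take (m - nn)).sum < 0 := pvSumNeg _ hLne hLneg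
  rw [hsub, htkm, hsp1, hsp2, List.sum_append, List.sum_append, hzsum]
  by_cases hc : t = 0 ∧ 0 = pos ∧ 1 ≤ k ∧ 0 < N.length
  · rw [if_pos hc]
    obtain ⟨ht0, hp0, -, hlen0⟩ := hc
    by_cases hnn0 : nn = 0
    · have hm2 : 2 ≤ m := by omega
      rw [← hp0, hnn0]
      simp only [List.take_zero, List.sum_nil, List.drop_zero, Nat.sub_zero, zero_add]
      have hcons : N = N.getD 0 0 :: N.drop 1 := by
        rw [List.getD_eq_getElem N 0 hlen0]
        exact (List.getElem_cons_drop hlen0).symm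
      conv_lhs => rw [hcons, show m = (m-1) + 1 by omega, List.take_succ_cons]
      rw [List.sum_cons]
      have hrne : (N.drop 1).take (m - 1) ≠ [] := by
        have hl : ((N.drop 1).take (m - 1)).length = m - 1 := by
          simp only [List.length_take, List.length_drop]
          omega
        intro h
        rw [h] at hl
        simp at hl
        omega
      have hrneg : ∀ x ∈ (N.drop 1).take (m - 1), x < 0 := by
        intro x hx
        rcases List.mem_iff_getElem.mp hx with ⟨j, hj, rfl⟩
        rw [List.getElem_take, List.getElem_drop]
        have hjl : 1 + j < N.length := by
          simp only [List.length_take, List.length_drop] at hj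
          omega
        have := hneg (1 + j) (by omega) hjl
        rwa [List.getD_eq_getElem N 0 hjl] at this
      have hrsum : ((N.drop 1).take (m - 1)).sum < 0 := pvSumNeg _ hrne hrneg
      intro heq
      omega
    · have h00 : N.getD 0 0 = 0 := by
        have ha := hnonneg 0 (by omega) (by omega)
        have hb := hnonpos 0 (by omega) (by omega)
        omega
      rw [h00]
      intro heq
      omega
  · rw [if_neg hc]
    intro heq
    omega

theorem pv_tight (cards : List Int) (hD : D_sum_of_others_cards cards) :
    sum_of_others_cards cards ≠ sum_of_others_cards_alt cards := by
  obtain ⟨N, hNpw, hbnn, hbng, hform⟩ := pv_forms cards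
  simp only [D_sum_of_others_cards] at hD
  obtain ⟨h1, h2, h3⟩ := hD
  rw [← hbng] at h1
  rw [← hbnn] at h2 h3
  rw [← hbng] at h3
  have hne := pvNe N hNpw (cards.count 102) (cards.count 103) h1 h2 h3
  intro heq
  rw [heq] at hform
  exact hne (by omega)

-- ===== VERDICT (by name: the statement is the Claim_ definition above) =====
theorem sum_of_others_cards_spec : Claim_unchanged_sum_of_others_cards := by
  intro cards _
  unfold Spec_sum_of_others_cards
  exact fun hnd => pv_main cards hnd

theorem sum_of_others_cards_changed : Claim_changed_sum_of_others_cards := by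
  unfold Claim_changed_sum_of_others_cards
  refine ⟨by decide, by decide, ?_, by decide, by decide⟩
  -- evaluate A's while loop on the witness step by step (pvALoop is
  -- well-founded recursion, so `decide` cannot reduce it by itself)
  show sum_of_others_cards [102, -5, 103] = -5
  unfold sum_of_others_cards
  rw [show PySem.List.sorted [(102:Int), -5, 103] (fun x => x) true = [103, 102, -5] from by decide]
  rw [pvALoop_step (by decide), show pvAStep [(103:Int), 102, -5] 0 = [0, 102, -5] from by decide]
  rw [pvALoop_step (by decide), show pvAStep [(0:Int), 102, -5] 1 = [0, 0, -5] from by decide]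
  rw [pvALoop_step (by decide), show pvAStep [(0:Int), 0, -5] 2 = [0, 0, -5] from by decide]
  rw [pvALoop_ge (by decide)]
  decide

theorem sum_of_others_cards_tight : Claim_exact_sum_of_others_cards := by
  intro cards _ hD
  exact pv_tight cards hD
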